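-- pv_equiv track=rewrite | github.com/GenryEden/kpolyakovName | 3000.py | f
-- ===== SOURCE A (Python) =====
-- def f(x):
-- 	a = 0
-- 	b = 0
-- 	while x > 0:
-- 		y = x % 10
-- 		if y > 4:
-- 			a += 1
-- 		if y < 6:
-- 			b += 1
-- 		x //= 10
-- 	return a, b
-- ===== SOURCE B (Python) =====
-- def f(x):
--     if x <= 0:
--         return (0, 0)
--     cnt = {}
--     for ch in str(x):
--         cnt[ch] = cnt.get(ch, 0) + 1
--     a = 0
--     for d in '56789':
--         a += cnt.get(d, 0)
--     b = 0
--     for d in '012345':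
--         b += cnt.get(d, 0)
--     return (a, b)
-- ===== Notes on version B (the rewrite author's own statement) =====
-- stated objective: idiomatic
-- what changed: Replaces the divmod loop with incremental counters by a digit-character histogram of str(x) followed by two bucket sums over '56789' and '012345'.
import Mathlib
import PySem

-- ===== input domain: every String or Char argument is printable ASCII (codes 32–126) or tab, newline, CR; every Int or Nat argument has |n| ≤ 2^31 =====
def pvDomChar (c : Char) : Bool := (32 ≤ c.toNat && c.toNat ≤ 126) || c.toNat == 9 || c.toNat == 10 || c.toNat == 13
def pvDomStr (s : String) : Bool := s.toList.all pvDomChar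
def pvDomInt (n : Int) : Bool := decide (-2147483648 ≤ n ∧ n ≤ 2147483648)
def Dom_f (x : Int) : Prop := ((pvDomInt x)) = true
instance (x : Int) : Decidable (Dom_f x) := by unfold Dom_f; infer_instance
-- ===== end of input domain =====

-- B re-implements the digit scan as a histogram of str(x) plus two bucket sums; return value proved equal everywhere.

-- ===== PORT A =====
-- the 'while x > 0' loop with its two counters a, b
def fLoop (a b x : Int) : Int × Int :=
  if h : 0 < x then
    let y := PySem.Int.mod x 10
    fLoop (if 4 < y then a + 1 else a) (if y < 6 then b + 1 else b) (PySem.Int.floordiv x 10)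
  else
    (a, b)
termination_by x.toNat
decreasing_by
  simp only [PySem.Int.floordiv, Int.fdiv_eq_ediv]
  omega

def f (x : Int) : Int × Int := fLoop 0 0 x

-- ===== PORT B =====
def f_alt (x : Int) : Int × Int :=
  if x ≤ 0 then (0, 0)
  else
    let cnt : PySem.Dict Char Int :=
      (PySem.Int.toStr x).toList.foldl (fun d ch => d.insert ch (d.getD ch 0 + 1)) PySem.Dict.empty
    let a := ("56789".toList).foldl (fun s d => s + cnt.getD d 0) 0
    let b := ("012345".toList).foldl (fun s d => s + cnt.getD d 0) 0
    (a, b)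

-- ===== PRECONDITION & SPEC =====
def Spec_f (x : Int) (out : Int × Int) : Prop := out = f_alt x
instance (x : Int) (out : Int × Int) : Decidable (Spec_f x out) := by unfold Spec_f; infer_instance

-- ===== CLAIM (what is proved, stated in full; the proofs are below) =====
def Claim_equal_f : Prop := ∀ (x : Int), Dom_f x → Spec_f x (f x)

-- ===== LEMMAS AND PROOFS =====

-- total count of the high digits ('5'..'9') in a char list, as an Int
def hiCount (cs : List Char) : Int :=
  ((cs.count '5' + cs.count '6' + cs.count '7' + cs.count '8' + cs.count '9' : Nat) : Int)

-- total count of the low digits ('0'..'5') in a char list, as an Int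
def loCount (cs : List Char) : Int :=
  ((cs.count '0' + cs.count '1' + cs.count '2' + cs.count '3' + cs.count '4' + cs.count '5' : Nat) : Int)

theorem mod_ten_pos (x : Int) (h : 0 < x) :
    PySem.Int.mod x 10 = ((x.toNat % 10 : Nat) : Int) := by
  simp [PySem.Int.mod, Int.fmod_eq_emod]; omega

theorem floordiv_ten_pos (x : Int) (h : 0 < x) :
    PySem.Int.floordiv x 10 = ((x.toNat / 10 : Nat) : Int) := by
  simp [PySem.Int.floordiv, Int.fdiv_eq_ediv]; omega

theorem hiCount_append_digit (cs : List Char) (m : Nat) (hm : m < 10) :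
    hiCount (cs ++ [Nat.digitChar m]) = hiCount cs + (if 4 < m then 1 else 0) := by
  interval_cases m <;> simp [hiCount, List.count_append, List.count_nil, Nat.digitChar] <;> omega

theorem loCount_append_digit (cs : List Char) (m : Nat) (hm : m < 10) :
    loCount (cs ++ [Nat.digitChar m]) = loCount cs + (if m < 6 then 1 else 0) := by
  interval_cases m <;> simp [loCount, List.count_append, List.count_nil, Nat.digitChar] <;> omega

theorem hiCount_digit (m : Nat) (hm : m < 10) :
    hiCount [Nat.digitChar m] = if 4 < m then 1 else 0 := by
  interval_cases m <;> simp [hiCount, Nat.digitChar]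

theorem loCount_digit (m : Nat) (hm : m < 10) :
    loCount [Nat.digitChar m] = if m < 6 then 1 else 0 := by
  interval_cases m <;> simp [loCount, Nat.digitChar]

theorem fLoop_eq (n : Nat) : ∀ (a b : Int), 0 < n →
    fLoop a b (n : Int) = (a + hiCount (Nat.toDigits 10 n), b + loCount (Nat.toDigits 10 n)) := by
  induction n using Nat.strong_induction_on with
  | _ n ih =>
    intro a b hn
    rw [fLoop]
    have hpos : (0 : Int) < (n : Int) := by exact_mod_cast hn
    rw [dif_pos hpos]
    have htn : ((n : Int)).toNat = n := by omega
    rw [mod_ten_pos _ hpos, floordiv_ten_pos _ hpos, htn]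
    by_cases hlt : n < 10
    · have hdiv : n / 10 = 0 := Nat.div_eq_of_lt hlt
      have hmod : n % 10 = n := Nat.mod_eq_of_lt hlt
      rw [hdiv, hmod]
      rw [fLoop]
      rw [dif_neg (by norm_num)]
      rw [Nat.toDigits_of_lt_base hlt, hiCount_digit n hlt, loCount_digit n hlt]
      simp only [Prod.mk.injEq]
      constructor <;> (split_ifs <;> omega)
    · push Not at hlt
      have hdpos : 0 < n / 10 := Nat.div_pos hlt (by norm_num)
      have hdlt : n / 10 < n := Nat.div_lt_self hn (by norm_num)
      rw [ih (n / 10) hdlt _ _ hdpos]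
      rw [Nat.toDigits_of_base_le (by norm_num) hlt]
      have hm : n % 10 < 10 := Nat.mod_lt _ (by norm_num)
      rw [hiCount_append_digit _ _ hm, loCount_append_digit _ _ hm]
      have h4 : ((4 : Int) < ((n % 10 : Nat) : Int)) ↔ 4 < n % 10 := by exact_mod_cast Iff.rfl
      have h6 : (((n % 10 : Nat) : Int) < 6) ↔ n % 10 < 6 := by exact_mod_cast Iff.rfl
      simp only [Prod.mk.injEq]
      constructor <;> (split_ifs <;> omega)

theorem f_alt_pos (x : Int) (h : 0 < x) :
    f_alt x = (hiCount (Nat.toDigits 10 x.toNat), loCount (Nat.toDigits 10 x.toNat)) := by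
  unfold f_alt
  rw [if_neg (by omega)]
  have hchars : (PySem.Int.toStr x).toList = Nat.toDigits 10 x.toNat := by
    rw [PySem.Int.toList_toStr, PySem.Int.toChars, if_neg (by omega)]
  simp only [hchars]
  simp only [PySem.Dict.getD_foldl_insert_add_one]
  have hemp : ∀ c : Char, (PySem.Dict.empty : PySem.Dict Char Int).getD c 0 = 0 := by
    intro c; simp [PySem.Dict.getD]
  have h5 : "56789".toList = ['5', '6', '7', '8', '9'] := by decide
  have h0 : "012345".toList = ['0', '1', '2', '3', '4', '5'] := by decide
  simp only [hemp, h5, h0, List.foldl, hiCount, loCount, Prod.mk.injEq]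
  constructor <;> (push_cast; ring)

-- ===== VERDICT (by name: the statement is the Claim_ definition above) =====
theorem f_spec : Claim_equal_f := by
  intro x _
  unfold Spec_f
  by_cases h : 0 < x
  · have hn : 0 < x.toNat := by omega
    have hl : fLoop 0 0 x = (0 + hiCount (Nat.toDigits 10 x.toNat), 0 + loCount (Nat.toDigits 10 x.toNat)) := by
      have hfe := fLoop_eq x.toNat 0 0 hn
      rwa [show ((x.toNat : Nat) : Int) = x from by omega] at hfe
    show fLoop 0 0 x = f_alt x
    rw [hl, f_alt_pos x h]
    simp
  · show fLoop 0 0 x = f_alt x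
    rw [fLoop, dif_neg h]
    unfold f_alt
    rw [if_pos (by omega)]
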